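-- pv_equiv track=rewrite | github.com/MuCephei/advent2020 | day_10/b.py | classify_adapters
-- ===== SOURCE A (Python) =====
-- def classify_adapters(adapters):
--     sections = []
--     section = []
--     for n in range(1, len(adapters)):
--         section.append(adapters[n-1])
--         difference = adapters[n] - adapters[n-1]
--         if difference == 3:
--             sections.append(section)
--             section = []
--     section.append(adapters[-1])
--     sections.append(section)
--     return sections
-- ===== SOURCE B (Python) =====
-- def classify_adapters(adapters):
--     cuts = [i for i in range(1, len(adapters)) if adapters[i] - adapters[i - 1] == 3]
--     boundaries = [0] + cuts + [len(adapters)]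
--     return [adapters[a:b] for a, b in zip(boundaries, boundaries[1:])]
-- ===== Notes on version B (the rewrite author's own statement) =====
-- stated objective: alternative
-- what changed: Replaces A's incremental append-and-flush accumulator loop by two passes: compute the cut indices (where the difference to the previous adapter is 3), then build the sections by slicing between consecutive boundaries.
import Mathlib
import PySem

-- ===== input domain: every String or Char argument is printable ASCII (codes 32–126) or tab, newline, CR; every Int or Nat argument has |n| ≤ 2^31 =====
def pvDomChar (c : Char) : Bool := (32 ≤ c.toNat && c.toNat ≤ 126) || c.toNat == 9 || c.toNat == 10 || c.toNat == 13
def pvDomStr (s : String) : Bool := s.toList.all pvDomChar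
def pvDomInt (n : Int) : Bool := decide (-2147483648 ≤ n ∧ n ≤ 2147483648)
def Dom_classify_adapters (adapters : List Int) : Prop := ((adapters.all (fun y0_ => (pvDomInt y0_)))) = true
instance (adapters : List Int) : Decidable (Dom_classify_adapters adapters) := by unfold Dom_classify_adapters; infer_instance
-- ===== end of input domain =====

-- B replaces A's incremental append-and-flush accumulator loop by two passes (cut indices, then
-- slices between consecutive boundaries); same asymptotic cost (objective: alternative).

-- ===== PORT A =====
def classify_adapters (adapters : List Int) : List (List Int) :=
  let st := (PySem.List.pyRange 1 adapters.length).foldl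
    (fun (p : List (List Int) × List Int) n =>
      let sec := p.2 ++ [PySem.List.pyGetD adapters (n - 1) 0]
      let difference := PySem.List.pyGetD adapters n 0 - PySem.List.pyGetD adapters (n - 1) 0
      if difference = 3 then (p.1 ++ [sec], ([] : List Int)) else (p.1, sec))
    ([], [])
  st.1 ++ [st.2 ++ [PySem.List.pyGetD adapters (-1) 0]]

-- ===== PORT B =====
def classify_adapters_alt (adapters : List Int) : List (List Int) :=
  let cuts := (PySem.List.pyRange 1 adapters.length).filter
    (fun i => PySem.List.pyGetD adapters i 0 - PySem.List.pyGetD adapters (i - 1) 0 = 3)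
  let boundaries := [(0 : Int)] ++ cuts ++ [(adapters.length : Int)]
  (boundaries.zip boundaries.tail).map (fun p => PySem.List.slice adapters (some p.1) (some p.2))

-- ===== PRECONDITION & SPEC =====
-- Pre_ excludes only the empty list, on which A raises IndexError indexing the last element.
def Pre_classify_adapters (adapters : List Int) : Prop := adapters ≠ []
instance (adapters : List Int) : Decidable (Pre_classify_adapters adapters) := by unfold Pre_classify_adapters; infer_instance
def pvWitness_classify_adapters : List Int := [1, 4, 5, 6, 9]

def Spec_classify_adapters (adapters : List Int) (out : List (List Int)) : Prop := out = classify_adapters_alt adapters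
instance (adapters : List Int) (out : List (List Int)) : Decidable (Spec_classify_adapters adapters out) := by unfold Spec_classify_adapters; infer_instance

-- ===== CLAIM (what is proved, stated in full; the proofs are below) =====
def Claim_equal_classify_adapters : Prop := ∀ (adapters : List Int), Dom_classify_adapters adapters → Pre_classify_adapters adapters → Spec_classify_adapters adapters (classify_adapters adapters)

-- ===== LEMMAS AND PROOFS =====

-- Python indexing facts (in-range indices ignore an appended last element; index -1 is the last element)
theorem pv_getD_append_left (xs : List Int) (y : Int) {i : Int} (h0 : 0 ≤ i)
    (h1 : i < xs.length) : PySem.List.pyGetD (xs ++ [y]) i 0 = PySem.List.pyGetD xs i 0 := by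
  rw [PySem.List.pyGetD_eq_getElem (xs ++ [y]) 0 h0 (by simp; omega),
      PySem.List.pyGetD_eq_getElem xs 0 h0 h1]
  exact List.getElem_append_left (by omega)

theorem pv_getD_append_last (xs : List Int) (y : Int) :
    PySem.List.pyGetD (xs ++ [y]) (xs.length) 0 = y := by
  rw [PySem.List.pyGetD_eq_getElem (xs ++ [y]) 0 (by positivity) (by simp)]
  simp

theorem pv_getD_neg_one (xs : List Int) (h : xs ≠ []) :
    PySem.List.pyGetD xs (-1) 0 = xs.getLastD 0 := by
  have hn : 0 < xs.length := List.length_pos_iff.mpr h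
  unfold PySem.List.pyGetD PySem.List.pyGet? PySem.List.pyIdx?
  rw [if_neg (by omega), if_pos (by omega)]
  simp only [Option.bind_some, show (-(-1:Int)).toNat = 1 from rfl]
  simp [List.getLastD_eq_getLast?, List.getLast?_eq_getElem?,
        List.getElem?_eq_getElem (show xs.length - 1 < xs.length by omega)]

theorem pv_getD_len_sub_one (xs : List Int) (h : xs ≠ []) :
    PySem.List.pyGetD xs ((xs.length : Int) - 1) 0 = xs.getLastD 0 := by
  have hn : 0 < xs.length := List.length_pos_iff.mpr h
  unfold PySem.List.pyGetD PySem.List.pyGet? PySem.List.pyIdx?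
  rw [if_pos (by omega), if_pos (by omega)]
  simp only [Option.bind_some]
  rw [show ((xs.length:Int) - 1).toNat = xs.length - 1 by omega]
  simp [List.getLastD_eq_getLast?, List.getLast?_eq_getElem?,
        List.getElem?_eq_getElem (show xs.length - 1 < xs.length by omega)]

-- A's loop body and loop state, named for the proofs
def pvStep (zs : List Int) (p : List (List Int) × List Int) (n : Int) :
    List (List Int) × List Int :=
  let sec := p.2 ++ [PySem.List.pyGetD zs (n - 1) 0]
  let difference := PySem.List.pyGetD zs n 0 - PySem.List.pyGetD zs (n - 1) 0
  if difference = 3 then (p.1 ++ [sec], ([] : List Int)) else (p.1, sec)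

def pvSt (zs : List Int) : List (List Int) × List Int :=
  (PySem.List.pyRange 1 zs.length).foldl (pvStep zs) ([], [])

theorem pv_classify_eq (zs : List Int) :
    classify_adapters zs = (pvSt zs).1 ++ [(pvSt zs).2 ++ [PySem.List.pyGetD zs (-1) 0]] := rfl

theorem pvSt_append (xs : List Int) (y : Int) (h : xs ≠ []) :
    pvSt (xs ++ [y]) = pvStep (xs ++ [y]) (pvSt xs) (xs.length : Int) := by
  have hn : 0 < xs.length := List.length_pos_iff.mpr h
  unfold pvSt
  rw [show (((xs ++ [y]).length : Nat) : Int) = (xs.length : Int) + 1 by simp]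
  rw [PySem.List.pyRange_one_succ_right (by exact_mod_cast hn), List.foldl_append]
  rw [PySem.List.foldl_congr_mem (PySem.List.pyRange 1 (xs.length : Int))
      (pvStep (xs ++ [y])) (pvStep xs) ([], [])
      (by
        intro acc i hi
        rw [PySem.List.mem_pyRange_one] at hi
        unfold pvStep
        rw [pv_getD_append_left xs y (by omega) (by omega),
            pv_getD_append_left xs y (by omega) (by omega)])]
  simp

-- A's snoc recurrence: appending y either starts a new section (diff 3) or extends the last one
theorem pvA_rec (xs : List Int) (y : Int) (h : xs ≠ []) :
    classify_adapters (xs ++ [y]) =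
      if y - xs.getLastD 0 = 3 then classify_adapters xs ++ [[y]]
      else (classify_adapters xs).dropLast ++ [(classify_adapters xs).getLastD [] ++ [y]] := by
  have hn : 0 < xs.length := List.length_pos_iff.mpr h
  rw [pv_classify_eq, pv_classify_eq, pvSt_append xs y h]
  unfold pvStep
  rw [pv_getD_append_left xs y (show (0:Int) ≤ (xs.length:Int) - 1 by omega) (by omega),
      pv_getD_len_sub_one xs h, pv_getD_append_last,
      pv_getD_neg_one (xs ++ [y]) (by simp), pv_getD_neg_one xs h,
      List.getLastD_concat]
  by_cases hd : y - xs.getLastD 0 = 3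
  · rw [if_pos hd, if_pos hd]; simp
  · rw [if_neg hd, if_neg hd]; simp

-- consecutive-pairs (zip with tail) snoc laws
theorem pvZC_append (l : List Int) (a : Int) (h : l ≠ []) :
    (l ++ [a]).zip (l ++ [a]).tail = l.zip l.tail ++ [(l.getLastD 0, a)] := by
  induction l with
  | nil => exact absurd rfl h
  | cons x t ih =>
    cases t with
    | nil => rfl
    | cons z r =>
      have h2 := ih (by simp)
      simp only [List.cons_append, List.tail_cons, List.zip_cons_cons] at h2 ⊢
      simp [h2]

theorem pvZC_snoc (x a : Int) (l : List Int) :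
    (x :: (l ++ [a])).zip (l ++ [a]) = (x :: l).zip l ++ [(l.getLastD x, a)] := by
  have := pvZC_append (x :: l) a (by simp)
  rw [List.getLastD_cons] at this
  simpa using this

-- slicing facts: slices below the old length ignore an appended element; a slice to the new length picks it up
theorem pv_slice_append_left (xs : List Int) (y : Int) {a b : Int} (h0 : 0 ≤ a) (h1 : 0 ≤ b)
    (h2 : b ≤ xs.length) :
    PySem.List.slice (xs ++ [y]) (some a) (some b) = PySem.List.slice xs (some a) (some b) := by
  rw [show a = ((a.toNat : Nat) : Int) by omega, show b = ((b.toNat : Nat) : Int) by omega,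
      PySem.List.slice_natCast, PySem.List.slice_natCast]
  by_cases hle : b.toNat ≤ a.toNat
  · rw [Nat.sub_eq_zero_of_le hle]; simp
  · rw [List.drop_append_of_le_length (by omega)]
    rw [List.take_append_of_le_length (by simp; omega)]

theorem pv_slice_append_last (xs : List Int) (y : Int) {a : Int} (h0 : 0 ≤ a)
    (h2 : a ≤ xs.length) :
    PySem.List.slice (xs ++ [y]) (some a) (some ((xs.length : Int) + 1))
      = PySem.List.slice xs (some a) (some (xs.length : Int)) ++ [y] := by
  rw [show a = ((a.toNat : Nat) : Int) by omega,
      show (xs.length : Int) + 1 = ((xs.length + 1 : Nat) : Int) by push_cast; ring,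
      show (xs.length : Int) = ((xs.length : Nat) : Int) from rfl,
      PySem.List.slice_natCast, PySem.List.slice_natCast]
  rw [List.drop_append_of_le_length (by omega)]
  have hK : List.take (xs.length + 1 - a.toNat) (List.drop a.toNat xs ++ [y])
      = List.drop a.toNat xs ++ [y] := List.take_of_length_le (by simp; omega)
  have hL : List.take (xs.length - a.toNat) (List.drop a.toNat xs)
      = List.drop a.toNat xs := List.take_of_length_le (by simp)
  rw [hK, hL]

theorem pv_slice_len_len (xs : List Int) :
    PySem.List.slice xs (some (xs.length : Int)) (some (xs.length : Int)) = [] := by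
  rw [show ((xs.length : Int)) = ((xs.length : Nat) : Int) from rfl, PySem.List.slice_natCast]
  simp

-- B's cut indices, named for the proofs
def pvCuts (zs : List Int) : List Int :=
  (PySem.List.pyRange 1 zs.length).filter
    (fun i => PySem.List.pyGetD zs i 0 - PySem.List.pyGetD zs (i - 1) 0 = 3)

theorem pv_alt_eq (zs : List Int) :
    classify_adapters_alt zs =
      ((((0 : Int) :: (pvCuts zs ++ [(zs.length : Int)])).zip
          (pvCuts zs ++ [(zs.length : Int)])).map
        (fun p => PySem.List.slice zs (some p.1) (some p.2))) := rfl

theorem pvCuts_mem (zs : List Int) {i : Int} (hi : i ∈ pvCuts zs) :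
    1 ≤ i ∧ i < zs.length := by
  unfold pvCuts at hi
  have := List.mem_filter.mp hi
  exact PySem.List.mem_pyRange_one.mp this.1

theorem pvCuts_append (xs : List Int) (y : Int) (h : xs ≠ []) :
    pvCuts (xs ++ [y]) = pvCuts xs ++
      (if y - xs.getLastD 0 = 3 then [(xs.length : Int)] else []) := by
  have hn : 0 < xs.length := List.length_pos_iff.mpr h
  unfold pvCuts
  rw [show (((xs ++ [y]).length : Nat) : Int) = (xs.length : Int) + 1 by simp]
  rw [PySem.List.pyRange_one_succ_right (by exact_mod_cast hn), List.filter_append]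
  rw [List.filter_congr (fun i hi => by
        have hb := PySem.List.mem_pyRange_one.mp hi
        rw [pv_getD_append_left xs y (by omega) (by omega),
            pv_getD_append_left xs y (by omega) (by omega)])]
  congr 1
  rw [List.filter_cons, List.filter_nil]
  rw [pv_getD_append_left xs y (show (0:Int) ≤ (xs.length:Int) - 1 by omega) (by omega),
      pv_getD_len_sub_one xs h, pv_getD_append_last]
  by_cases hd : y - xs.getLastD 0 = 3
  · rw [if_pos hd, if_pos (by simpa using hd)]
  · rw [if_neg hd, if_neg (by simpa using hd)]

theorem pv_b0_bound (xs : List Int) {e : Int}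
    (he : e ∈ (0 : Int) :: (pvCuts xs ++ [(xs.length : Int)])) :
    0 ≤ e ∧ e ≤ xs.length := by
  rcases List.mem_cons.mp he with h0 | h1
  · omega
  · rcases List.mem_append.mp h1 with hc | hl
    · have := pvCuts_mem xs hc; omega
    · simp at hl; omega

theorem pv_cut0_bound (xs : List Int) {e : Int} (he : e ∈ (0 : Int) :: pvCuts xs) :
    0 ≤ e ∧ e ≤ xs.length := by
  rcases List.mem_cons.mp he with h0 | hc
  · omega
  · have := pvCuts_mem xs hc; omega

-- B's snoc recurrence: the same shape as A's
theorem pvB_rec (xs : List Int) (y : Int) (h : xs ≠ []) :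
    classify_adapters_alt (xs ++ [y]) =
      if y - xs.getLastD 0 = 3 then classify_adapters_alt xs ++ [[y]]
      else (classify_adapters_alt xs).dropLast
           ++ [(classify_adapters_alt xs).getLastD [] ++ [y]] := by
  have hn : 0 < xs.length := List.length_pos_iff.mpr h
  rw [pv_alt_eq, pv_alt_eq, pvCuts_append xs y h]
  rw [show (((xs ++ [y]).length : Nat) : Int) = (xs.length : Int) + 1 by simp]
  by_cases hd : y - xs.getLastD 0 = 3
  · rw [if_pos hd, if_pos hd]
    rw [pvZC_snoc 0 ((xs.length : Int) + 1) (pvCuts xs ++ [(xs.length : Int)])]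
    rw [List.map_append]
    rw [List.map_congr_left (fun p hp => by
      have h1 := pv_b0_bound xs (List.of_mem_zip hp).1
      have h2 := pv_b0_bound xs (List.mem_cons_of_mem _ (List.of_mem_zip hp).2)
      exact pv_slice_append_left xs y h1.1 h2.1 h2.2)]
    rw [List.getLastD_concat, List.map_singleton]
    rw [pv_slice_append_last xs y (by omega) (by omega), pv_slice_len_len]
    simp
  · rw [if_neg hd, if_neg hd, List.append_nil]
    rw [pvZC_snoc 0 ((xs.length : Int) + 1) (pvCuts xs),
        pvZC_snoc 0 (xs.length : Int) (pvCuts xs)]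
    rw [List.map_append, List.map_append, List.map_singleton, List.map_singleton]
    rw [List.dropLast_concat, List.getLastD_concat]
    rw [List.map_congr_left (fun p hp => by
      have h1 := pv_cut0_bound xs (List.of_mem_zip hp).1
      have h2 := pv_cut0_bound xs (List.mem_cons_of_mem _ (List.of_mem_zip hp).2)
      exact pv_slice_append_left xs y h1.1 h2.1 h2.2)]
    have hgl := pv_cut0_bound xs (List.getLastD_mem_cons (l := pvCuts xs) (a := (0:Int)))
    rw [pv_slice_append_last xs y hgl.1 hgl.2]

theorem pv_single (x : Int) :
    classify_adapters [x] = [[x]] ∧ classify_adapters_alt [x] = [[x]] := by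
  constructor
  · unfold classify_adapters
    norm_num [PySem.List.pyRange, PySem.List.pyGetD, PySem.List.pyGet?, PySem.List.pyIdx?]
  · unfold classify_adapters_alt
    norm_num [PySem.List.pyRange, PySem.List.slice, PySem.List.pyIdx?]

theorem pv_main (xs : List Int) (h : xs ≠ []) :
    classify_adapters xs = classify_adapters_alt xs := by
  induction xs using List.reverseRecOn with
  | nil => exact absurd rfl h
  | append_singleton l y ih =>
    rcases eq_or_ne l [] with hl | hl
    · subst hl
      simp only [List.nil_append]
      rw [(pv_single y).1, (pv_single y).2]
    · rw [pvA_rec l y hl, pvB_rec l y hl, ih hl]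

-- ===== VERDICT (by name: the statement is the Claim_ definition above) =====
theorem classify_adapters_spec : Claim_equal_classify_adapters := by
  intro adapters _ hpre
  exact pv_main adapters hpre
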